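-- pv_equiv track=rewrite | github.com/pypi-data/pypi-mirror-386 | packages/wowool-common/wowool_common-3.6.4-py3-none-any.whl/wowool/utility/iterators/__init__.py | iterate_nxt
-- ===== SOURCE A (Python) =====
-- from typing import Iterator, Tuple, Any, List
--
-- def iterate_nxt(my_list: List[Any]) -> Iterator[Tuple[int, Any, Any]]:
--     """Create an iterator that returns current and next elements.
--
--     Args:
--         my_list: List to iterate over.
--
--     Yields:
--         Tuple of (index, current_item, next_item).
--     """
--     cur, nxt = iter(my_list), iter(my_list)
--     next(nxt, None)
--     idx = 0
--
--     while True: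
--         try:
--             yield idx, next(cur), next(nxt, None)
--             idx += 1
--         except StopIteration:
--             break
-- ===== SOURCE B (Python) =====
-- from typing import Iterator, Tuple, Any, List
--
-- def iterate_nxt(my_list: List[Any]) -> Iterator[Tuple[int, Any, Any]]:
--     """Yield (index, current_item, next_item) for each item; next_item of the last is None."""
--     n = len(my_list)
--     for i in range(n):
--         nxt = my_list[i + 1] if i + 1 < n else None
--         yield i, my_list[i], nxt
-- ===== Notes on version B (the rewrite author's own statement) =====
-- stated objective: simpler
-- what changed: Replaced the dual-iterator while-True/try/StopIteration scheme with a bounded index-based for loop that reads my_list[i] and my_list[i+1] with an explicit boundary check.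
import Mathlib
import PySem

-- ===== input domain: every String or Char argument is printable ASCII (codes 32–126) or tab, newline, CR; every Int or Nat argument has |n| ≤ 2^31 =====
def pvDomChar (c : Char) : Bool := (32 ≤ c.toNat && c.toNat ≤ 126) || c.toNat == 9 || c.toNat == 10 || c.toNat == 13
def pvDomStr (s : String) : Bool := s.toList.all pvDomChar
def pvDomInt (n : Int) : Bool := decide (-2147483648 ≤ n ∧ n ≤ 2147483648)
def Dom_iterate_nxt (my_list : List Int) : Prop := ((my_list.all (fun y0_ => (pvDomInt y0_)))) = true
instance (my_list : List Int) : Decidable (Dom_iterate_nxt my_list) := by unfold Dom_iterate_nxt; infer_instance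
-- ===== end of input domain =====

-- B replaces A's dual-iterator while-True/StopIteration scheme with a bounded
-- index loop using an explicit boundary check (objective: simpler).


-- ===== PORT A =====
-- A drives two iterators over the list (nxt primed one step ahead by next(nxt, None));
-- the loop state is the remaining tails of both iterators plus idx.
def iterate_nxt_loop : List Int → List Int → Int → List (Int × Int × Option Int)
  | [], _, _ => []                                  -- next(cur) raises StopIteration → break
  | c :: cs, nxt, idx => (idx, c, nxt.head?) :: iterate_nxt_loop cs nxt.tail (idx + 1)

def iterate_nxt (my_list : List Int) : List (Int × Int × Option Int) :=
  iterate_nxt_loop my_list my_list.tail 0          -- cur = iter(l); nxt = iter(l) with one element consumed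

-- ===== PORT B =====
-- for i in range(n): yield (i, my_list[i], my_list[i+1] if i+1 < n else None)
def iterate_nxt_alt (my_list : List Int) : List (Int × Int × Option Int) :=
  (PySem.List.pyRange 0 my_list.length 1).map (fun i =>
    (i, PySem.List.pyGetD my_list i 0,
     if i + 1 < (my_list.length : Int) then PySem.List.pyGet? my_list (i + 1) else none))

-- ===== PRECONDITION & SPEC =====
def Spec_iterate_nxt (my_list : List Int) (out : List (Int × Int × Option Int)) : Prop := out = iterate_nxt_alt my_list
instance (my_list : List Int) (out : List (Int × Int × Option Int)) : Decidable (Spec_iterate_nxt my_list out) := by unfold Spec_iterate_nxt; infer_instance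

-- ===== CLAIM (what is proved, stated in full; the proofs are below) =====
def Claim_equal_iterate_nxt : Prop := ∀ (my_list : List Int), Dom_iterate_nxt my_list → Spec_iterate_nxt my_list (iterate_nxt my_list)

-- ===== LEMMAS AND PROOFS =====

-- A's loop with nxt = cur.tail (the invariant the two iterators maintain) enumerates the list.
lemma iterate_nxt_loop_eq (l : List Int) (idx : Int) :
    iterate_nxt_loop l l.tail idx =
      (List.range l.length).map (fun (k : Nat) => (idx + (k : Int), l.getD k 0, l[k+1]?)) := by
  induction l generalizing idx with
  | nil => simp [iterate_nxt_loop]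
  | cons c cs ih =>
    simp only [iterate_nxt_loop, List.tail_cons, List.length_cons,
      List.range_succ_eq_map, List.map_cons, List.map_map]
    refine congrArg₂ _ (by simp [List.head?_eq_getElem?]) ?_
    rw [ih (idx + 1)]
    refine List.map_congr_left fun k _ => ?_
    simp only [Function.comp_apply, List.getD_cons_succ, List.getElem?_cons_succ,
      Prod.mk.injEq, and_true]
    push_cast; ring

-- B's index loop computes the same enumeration.
lemma alt_eq (l : List Int) :
    iterate_nxt_alt l =
      (List.range l.length).map (fun (k : Nat) => ((0 : Int) + (k : Int), l.getD k 0, l[k+1]?)) := by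
  unfold iterate_nxt_alt
  rw [PySem.List.pyRange_zero_natCast, List.map_map]
  refine List.map_congr_left fun k hk => ?_
  simp only [List.mem_range] at hk
  have h1 : ((k : Int) + 1) = ((k + 1 : Nat) : Int) := by push_cast; ring
  simp only [Function.comp_apply]
  split_ifs with h
  · have hk1 : k + 1 < l.length := by exact_mod_cast h
    rw [h1, PySem.List.pyGet?_natCast]
    simp
  · have hk1 : l.length ≤ k + 1 := by omega
    simp [List.getElem?_eq_none hk1]

-- ===== VERDICT (by name: the statement is the Claim_ definition above) =====
theorem iterate_nxt_spec : Claim_equal_iterate_nxt := by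
  intro l _
  unfold Spec_iterate_nxt iterate_nxt
  rw [iterate_nxt_loop_eq, alt_eq]
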